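-- pv_equiv track=rewrite | github.com/Eczemuth/OOD | chapter06/0604_perket.py | perket
-- ===== SOURCE A (Python) =====
-- def find_flavor(breads, y_sour, y_bitter, index=0):
--     if index == len(breads) - 1:
--         return breads[index][0], breads[index][1]
--     sour, bitter = find_flavor(breads, y_sour, y_bitter, index + 1)
--     return y_sour * sour * breads[index][0], y_bitter + bitter + breads[index][1]
--
-- def perket(bread_list_combi, bread_list_index=0, min_diff=1000000001):
--     if bread_list_index == len(bread_list_combi):
--         return min_diff
--     y_sour, y_bitter = find_flavor(bread_list_combi[bread_list_index], 1, 0)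
--     diff = abs(y_sour - y_bitter)
--     using_diff = min_diff
--     if diff <= min_diff:
--         using_diff = diff
--     min_diff = perket(bread_list_combi, bread_list_index + 1, using_diff)
--     return min_diff
-- ===== SOURCE B (Python) =====
-- def perket(bread_list_combi, bread_list_index=0, min_diff=1000000001):
--     best = min_diff
--     for j in range(bread_list_index, len(bread_list_combi)):
--         sour, bitter = 1, 0
--         for s, b in bread_list_combi[j]:
--             sour *= s
--             bitter += b
--         best = min(best, abs(sour - bitter))
--     return best
-- ===== Notes on version B (the rewrite author's own statement) =====
-- stated objective: simpler
-- what changed: Replaced both recursions (perket's tail recursion over indices and find_flavor's self-recursion over a combination) by two plain iterative loops accumulating the running product/sum and minimum directly.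
import Mathlib
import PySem

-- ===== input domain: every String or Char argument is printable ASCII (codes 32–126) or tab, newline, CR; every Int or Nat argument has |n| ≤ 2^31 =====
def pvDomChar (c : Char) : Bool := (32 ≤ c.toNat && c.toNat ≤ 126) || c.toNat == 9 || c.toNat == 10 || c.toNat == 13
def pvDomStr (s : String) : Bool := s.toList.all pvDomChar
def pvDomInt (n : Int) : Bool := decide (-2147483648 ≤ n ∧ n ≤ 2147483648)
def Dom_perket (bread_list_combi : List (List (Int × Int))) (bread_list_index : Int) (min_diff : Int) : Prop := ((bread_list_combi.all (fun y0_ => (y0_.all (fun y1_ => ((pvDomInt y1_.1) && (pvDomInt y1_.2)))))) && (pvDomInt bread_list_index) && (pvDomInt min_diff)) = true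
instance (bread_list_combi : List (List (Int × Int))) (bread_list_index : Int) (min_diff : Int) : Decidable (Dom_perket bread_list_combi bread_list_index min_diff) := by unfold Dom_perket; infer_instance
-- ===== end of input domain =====

-- B rewrites both recursions of A (perket's tail recursion over indices and find_flavor's
-- self-recursion over a combination) as two plain iterative loops; equal return values on Pre_
-- (no speed claim).

-- ===== PORT A =====
-- find_flavor: faithful for 0 ≤ index < breads.length (all calls made under Pre_ stay there);
-- the `index + 1 ≥ length` guard is Python's `index == len(breads) - 1` there and only makes
-- the recursion total (Python diverges on an empty combination, which Pre_ excludes).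
def findFlavor (breads : List (Int × Int)) (y_sour y_bitter : Int) (index : Nat) : Int × Int :=
  if index + 1 ≥ breads.length then
    ((breads.getD index (0, 0)).1, (breads.getD index (0, 0)).2)
  else
    let sb := findFlavor breads y_sour y_bitter (index + 1)
    (y_sour * sb.1 * (breads.getD index (0, 0)).1,
     y_bitter + sb.2 + (breads.getD index (0, 0)).2)
termination_by breads.length - index

def perket (bread_list_combi : List (List (Int × Int))) (bread_list_index : Int) (min_diff : Int) : Int :=
  if bread_list_index = (bread_list_combi.length : Int) then min_diff
  else
    match h : PySem.List.pyGet? bread_list_combi bread_list_index with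
    | none => min_diff   -- Python raises IndexError here; excluded by Pre_
    | some breads =>
      let ysb := findFlavor breads 1 0 0
      let diff := |ysb.1 - ysb.2|
      let using_diff := if diff ≤ min_diff then diff else min_diff
      perket bread_list_combi (bread_list_index + 1) using_diff
termination_by ((bread_list_combi.length : Int) - bread_list_index).toNat
decreasing_by
  have hin : PySem.Raise.InRange bread_list_combi.length bread_list_index := by
    by_contra hc
    rw [← PySem.List.pyGet?_eq_none_iff (xs := bread_list_combi)] at hc
    simp [hc] at h
  unfold PySem.Raise.InRange at hin
  omega

-- ===== PORT B =====
def perket_alt (bread_list_combi : List (List (Int × Int))) (bread_list_index : Int) (min_diff : Int) : Int :=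
  (PySem.List.pyRange bread_list_index bread_list_combi.length).foldl
    (fun best j =>
      let sb := (PySem.List.pyGetD bread_list_combi j []).foldl
        (fun sb p => (sb.1 * p.1, sb.2 + p.2)) ((1 : Int), (0 : Int))
      min best |sb.1 - sb.2|) min_diff

-- ===== PRECONDITION & SPEC =====
-- Pre_ excludes exactly the inputs on which Python A does not return: bread_list_index out of
-- Python's index range (IndexError) and an empty combination among the visited ones, on which
-- find_flavor recurses forever (RecursionError); for a negative in-range index A's wraparound
-- visits every combination, hence the max with 0 in the non-emptiness condition.
def Pre_perket (bread_list_combi : List (List (Int × Int))) (bread_list_index : Int) (min_diff : Int) : Prop :=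
  -(bread_list_combi.length : Int) ≤ bread_list_index ∧
    bread_list_index ≤ bread_list_combi.length ∧
    ∀ c ∈ bread_list_combi.drop (max bread_list_index 0).toNat, c ≠ []
instance (bread_list_combi : List (List (Int × Int))) (bread_list_index : Int) (min_diff : Int) : Decidable (Pre_perket bread_list_combi bread_list_index min_diff) := by unfold Pre_perket; infer_instance

def pvWitness_perket : (List (List (Int × Int))) × Int × Int := ([[(2, 3)], [(10, 1)]], 0, 1000000001)

def Spec_perket (bread_list_combi : List (List (Int × Int))) (bread_list_index : Int) (min_diff : Int) (out : Int) : Prop := out = perket_alt bread_list_combi bread_list_index min_diff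
instance (bread_list_combi : List (List (Int × Int))) (bread_list_index : Int) (min_diff : Int) (out : Int) : Decidable (Spec_perket bread_list_combi bread_list_index min_diff out) := by unfold Spec_perket; infer_instance

-- ===== CLAIM (what is proved, stated in full; the proofs are below) =====
def Claim_equal_perket : Prop := ∀ (bread_list_combi : List (List (Int × Int))) (bread_list_index : Int) (min_diff : Int), Dom_perket bread_list_combi bread_list_index min_diff → Pre_perket bread_list_combi bread_list_index min_diff → Spec_perket bread_list_combi bread_list_index min_diff (perket bread_list_combi bread_list_index min_diff)

-- ===== LEMMAS AND PROOFS =====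

-- B's inner loop: (product of sournesses, sum of bitternesses)
theorem inner_foldl_eq (l : List (Int × Int)) (a b : Int) :
    l.foldl (fun sb p => (sb.1 * p.1, sb.2 + p.2)) (a, b)
      = (a * (l.map Prod.fst).prod, b + (l.map Prod.snd).sum) := by
  induction l generalizing a b with
  | nil => simp
  | cons x xs ih => simp [List.foldl_cons, ih, mul_assoc, add_assoc]

theorem findFlavor_eq (breads : List (Int × Int)) (index : Nat) (h : index < breads.length) :
    findFlavor breads 1 0 index
      = (((breads.drop index).map Prod.fst).prod, ((breads.drop index).map Prod.snd).sum) := by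
  induction hn : breads.length - index generalizing index with
  | zero => omega
  | succ n ih =>
    rw [findFlavor]
    by_cases hb : index + 1 ≥ breads.length
    · have hdrop : breads.drop (index + 1) = [] := List.drop_eq_nil_of_le hb
      rw [List.drop_eq_getElem_cons h]
      simp [hb, hdrop, List.getElem?_eq_getElem h, List.getD]
    · have hlt : index + 1 < breads.length := by omega
      simp only [hb, if_false]
      rw [ih (index + 1) hlt (by omega)]
      have h1 : (breads.drop index).map Prod.fst
          = breads[index].1 :: (breads.drop (index + 1)).map Prod.fst := by
        rw [List.drop_eq_getElem_cons h]; rfl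
      have h2 : (breads.drop index).map Prod.snd
          = breads[index].2 :: (breads.drop (index + 1)).map Prod.snd := by
        rw [List.drop_eq_getElem_cons h]; rfl
      simp [h1, h2, List.getElem?_eq_getElem h, List.getD, mul_comm, add_comm]

theorem perket_eq_alt_fold (bread_list_combi : List (List (Int × Int))) :
    ∀ (n : Nat) (i md : Int), ((bread_list_combi.length : Int) - i).toNat = n →
      -(bread_list_combi.length : Int) ≤ i → i ≤ bread_list_combi.length →
      (∀ c ∈ bread_list_combi.drop (max i 0).toNat, c ≠ []) →
      perket bread_list_combi i md
        = (PySem.List.pyRange i bread_list_combi.length).foldl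
            (fun best j =>
              let sb := (PySem.List.pyGetD bread_list_combi j []).foldl
                (fun sb p => (sb.1 * p.1, sb.2 + p.2)) ((1 : Int), (0 : Int))
              min best |sb.1 - sb.2|) md := by
  intro n
  induction n with
  | zero =>
    intro i md hn hge hle _
    have hi : i = (bread_list_combi.length : Int) := by omega
    rw [perket, if_pos hi, hi]
    simp [PySem.List.pyRange]

  | succ n ih =>
    intro i md hn hge hle hne
    have hi : i < (bread_list_combi.length : Int) := by omega
    have hin : PySem.Raise.InRange bread_list_combi.length i := ⟨hge, hi⟩
    obtain ⟨x, hx⟩ : ∃ x, PySem.List.pyGet? bread_list_combi i = some x := by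
      cases h : PySem.List.pyGet? bread_list_combi i with
      | none => exact absurd hin ((PySem.List.pyGet?_eq_none_iff _ _).mp h)
      | some y => exact ⟨y, rfl⟩
    have hGetD : PySem.List.pyGetD bread_list_combi i [] = x := by
      simp [PySem.List.pyGetD, hx]
    have hxne : x ≠ [] := by
      apply hne
      by_cases h0 : 0 ≤ i
      · have hit : i.toNat < bread_list_combi.length := by omega
        have : x = bread_list_combi[i.toNat] := by
          rw [PySem.List.pyGet?_eq_some_getElem _ h0 hi] at hx
          exact (Option.some.injEq _ _ ▸ hx).symm
        have hmax : (max i 0).toNat = i.toNat := by omega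
        rw [hmax, this, List.drop_eq_getElem_cons hit]
        exact List.mem_cons_self ..
      · have hmax : (max i 0).toNat = 0 := by omega
        rw [hmax, List.drop_zero]
        exact PySem.List.mem_of_pyGet?_eq_some _ hx
    have hlen0 : 0 < x.length := List.length_pos_iff.mpr hxne
    have hne' : ∀ c ∈ bread_list_combi.drop (max (i + 1) 0).toNat, c ≠ [] := by
      intro c hc
      apply hne
      by_cases h0 : 0 ≤ i
      · have hit : i.toNat < bread_list_combi.length := by omega
        have h1 : (max (i + 1) 0).toNat = i.toNat + 1 := by omega
        have h2 : (max i 0).toNat = i.toNat := by omega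
        rw [h1] at hc
        rw [h2, List.drop_eq_getElem_cons hit]
        exact List.mem_cons_of_mem _ hc
      · have h1 : (max (i + 1) 0).toNat = (max i 0).toNat := by omega
        rw [h1] at hc
        exact hc
    have hrec := ih (i + 1)
      (if |(((x.drop 0).map Prod.fst).prod) - (((x.drop 0).map Prod.snd).sum)| ≤ md
        then |(((x.drop 0).map Prod.fst).prod) - (((x.drop 0).map Prod.snd).sum)| else md)
      (by omega) (by omega) (by omega) hne'
    rw [perket, if_neg (by omega)]
    split
    next hg => rw [hx] at hg; cases hg
    next breads hg =>
      rw [hx] at hg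
      injection hg with hb
      subst hb
      simp only [findFlavor_eq _ 0 hlen0]
      rw [hrec]
      rw [PySem.List.pyRange_one_cons hi, List.foldl_cons]
      simp only [hGetD, inner_foldl_eq, List.drop_zero]
      congr 1
      rw [min_comm, min_def]
      simp

-- ===== VERDICT (by name: the statement is the Claim_ definition above) =====
theorem perket_spec : Claim_equal_perket := by
  intro combis i md _ hpre
  obtain ⟨hge, hle, hne⟩ := hpre
  show perket combis i md = perket_alt combis i md
  rw [perket_eq_alt_fold combis _ i md rfl hge hle hne]
  rfl
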